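-- pv_equiv track=rewrite | github.com/s3nex-com/sdlc-skills-library | skills/phase1/architecture-review-governance/scripts/review_report.py | determine_overall_status
-- ===== SOURCE A (Python) =====
-- def determine_overall_status(findings: list[dict]) -> str:
--     """Determine the overall review status based on open findings."""
--     open_findings = [f for f in findings if f.get("status", "Open") not in ("Resolved", "Accepted")]
--     severities = {f.get("severity", "Informational") for f in open_findings}
--
--     if "Critical" in severities:
--         return "❌ Fail — Critical findings must be resolved before proceeding"
--     elif "High" in severities:
--         return "⚠️ Conditional pass — High findings must be resolved before next milestone"
--     elif "Medium" in severities: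
--         return "⚠️ Conditional pass — Medium findings should be addressed in next sprint"
--     elif open_findings:
--         return "✅ Pass with observations — Low/informational findings noted"
--     else:
--         return "✅ Pass — No open findings"
-- ===== SOURCE B (Python) =====
-- _RANK = {"Critical": 3, "High": 2, "Medium": 1}
--
-- def determine_overall_status(findings: list[dict]) -> str:
--     """Determine the overall review status based on open findings."""
--     max_rank = 0
--     open_count = 0
--     for f in findings:
--         if f.get("status", "Open") in ("Resolved", "Accepted"):
--             continue
--         open_count += 1
--         r = _RANK.get(f.get("severity", "Informational"), 0)
--         if r > max_rank:
--             max_rank = r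
--     if max_rank == 3:
--         return "❌ Fail — Critical findings must be resolved before proceeding"
--     if max_rank == 2:
--         return "⚠️ Conditional pass — High findings must be resolved before next milestone"
--     if max_rank == 1:
--         return "⚠️ Conditional pass — Medium findings should be addressed in next sprint"
--     if open_count > 0:
--         return "✅ Pass with observations — Low/informational findings noted"
--     return "✅ Pass — No open findings"
-- ===== Notes on version B (the rewrite author's own statement) =====
-- stated objective: idiomatic
-- what changed: Replaces the intermediate open-findings list and severity set with a single pass maintaining a scalar max-severity rank and an open count, selecting the message from those two integers.
import Mathlib
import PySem

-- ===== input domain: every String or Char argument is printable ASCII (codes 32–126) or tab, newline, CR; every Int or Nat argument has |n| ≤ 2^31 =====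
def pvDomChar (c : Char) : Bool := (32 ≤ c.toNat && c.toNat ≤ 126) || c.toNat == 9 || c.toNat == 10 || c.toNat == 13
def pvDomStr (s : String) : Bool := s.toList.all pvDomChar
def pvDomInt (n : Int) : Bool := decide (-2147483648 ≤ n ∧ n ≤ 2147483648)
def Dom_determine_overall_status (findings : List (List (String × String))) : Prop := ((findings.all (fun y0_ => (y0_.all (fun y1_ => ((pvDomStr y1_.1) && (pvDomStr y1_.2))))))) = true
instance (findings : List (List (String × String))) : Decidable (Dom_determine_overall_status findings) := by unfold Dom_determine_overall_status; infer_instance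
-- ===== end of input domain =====

-- B replaces A's intermediate list + severity set with one pass keeping a scalar max-rank and open count (idiomatic, same cost).

-- f.get(key, default) on a dict given as an association list: first match wins.
def pvGet (f : List (String × String)) (k d : String) : String :=
  match f.find? (fun p => p.1 == k) with
  | some p => p.2
  | none => d

-- ===== PORT A =====
def determine_overall_status (findings : List (List (String × String))) : String :=
  let open_findings := findings.filter (fun f =>
    !(pvGet f "status" "Open" == "Resolved" || pvGet f "status" "Open" == "Accepted"))
  let severities : PySem.Set String :=
    PySem.Set.ofList (open_findings.map (fun f => pvGet f "severity" "Informational"))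
  if PySem.Set.contains severities "Critical" then
    "❌ Fail — Critical findings must be resolved before proceeding"
  else if PySem.Set.contains severities "High" then
    "⚠️ Conditional pass — High findings must be resolved before next milestone"
  else if PySem.Set.contains severities "Medium" then
    "⚠️ Conditional pass — Medium findings should be addressed in next sprint"
  else if !open_findings.isEmpty then
    "✅ Pass with observations — Low/informational findings noted"
  else
    "✅ Pass — No open findings"

-- ===== PORT B =====
def pvRank (s : String) : Int :=
  if s == "Critical" then 3 else if s == "High" then 2 else if s == "Medium" then 1 else 0

def determine_overall_status_alt (findings : List (List (String × String))) : String :=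
  let st : Int × Int := findings.foldl (fun acc f =>
    if pvGet f "status" "Open" == "Resolved" || pvGet f "status" "Open" == "Accepted" then acc
    else (max acc.1 (pvRank (pvGet f "severity" "Informational")), acc.2 + 1)) (0, 0)
  if st.1 == 3 then
    "❌ Fail — Critical findings must be resolved before proceeding"
  else if st.1 == 2 then
    "⚠️ Conditional pass — High findings must be resolved before next milestone"
  else if st.1 == 1 then
    "⚠️ Conditional pass — Medium findings should be addressed in next sprint"
  else if st.2 > 0 then
    "✅ Pass with observations — Low/informational findings noted"
  else
    "✅ Pass — No open findings"

-- ===== PRECONDITION & SPEC =====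
def Spec_determine_overall_status (findings : List (List (String × String))) (out : String) : Prop := out = determine_overall_status_alt findings
instance (findings : List (List (String × String))) (out : String) : Decidable (Spec_determine_overall_status findings out) := by unfold Spec_determine_overall_status; infer_instance

-- ===== CLAIM (what is proved, stated in full; the proofs are below) =====
def Claim_equal_determine_overall_status : Prop := ∀ (findings : List (List (String × String))), Dom_determine_overall_status findings → Spec_determine_overall_status findings (determine_overall_status findings)

-- ===== LEMMAS AND PROOFS =====

-- severities of the open findings, as a plain list
def pvSevs (findings : List (List (String × String))) : List String :=
  (findings.filter (fun f =>
    !(pvGet f "status" "Open" == "Resolved" || pvGet f "status" "Open" == "Accepted"))).map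
    (fun f => pvGet f "severity" "Informational")

def pvMaxr (L : List String) : Int := L.foldl (fun a s => max a (pvRank s)) 0

lemma foldB (findings : List (List (String × String))) : ∀ (m c : Int),
    findings.foldl (fun acc f =>
      if pvGet f "status" "Open" == "Resolved" || pvGet f "status" "Open" == "Accepted" then acc
      else (max acc.1 (pvRank (pvGet f "severity" "Informational")), acc.2 + 1)) (m, c)
    = ((pvSevs findings).foldl (fun a s => max a (pvRank s)) m,
       c + (pvSevs findings).length) := by
  induction findings with
  | nil => intro m c; simp [pvSevs]
  | cons f fs ih =>
    intro m c
    by_cases h : (pvGet f "status" "Open" == "Resolved" || pvGet f "status" "Open" == "Accepted") = true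
    · have hs : pvSevs (f :: fs) = pvSevs fs := by
        simp only [pvSevs, List.filter_cons]
        split_ifs with hcond
        · exfalso; simp at h hcond; tauto
        · rfl
      rw [List.foldl_cons, if_pos h, ih, hs]
    · have h' : (pvGet f "status" "Open" == "Resolved" || pvGet f "status" "Open" == "Accepted") = false := by
        simpa using h
      have hs : pvSevs (f :: fs) = pvGet f "severity" "Informational" :: pvSevs fs := by
        simp only [pvSevs, List.filter_cons]
        split_ifs with hcond
        · rfl
        · exfalso; simp at h' hcond; tauto
      rw [List.foldl_cons, if_neg h, ih, hs, List.foldl_cons, List.length_cons]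
      refine Prod.ext rfl ?_
      push_cast; ring

lemma rank_le3 (s : String) : pvRank s ≤ 3 := by
  unfold pvRank; split_ifs <;> norm_num

lemma foldl_max_le {L : List String} {k : Int} (hk : ∀ s ∈ L, pvRank s ≤ k) {a : Int} (ha : a ≤ k) :
    L.foldl (fun a s => max a (pvRank s)) a ≤ k := by
  induction L generalizing a with
  | nil => simpa
  | cons x xs ih =>
    simp only [List.foldl_cons]
    exact ih (fun s hs => hk s (List.mem_cons_of_mem _ hs))
      (max_le ha (hk x (List.mem_cons_self)))

lemma foldl_max_ge_init {L : List String} {a : Int} :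
    a ≤ L.foldl (fun a s => max a (pvRank s)) a := by
  induction L generalizing a with
  | nil => simp
  | cons x xs ih => exact le_trans (le_max_left _ _) ih

lemma foldl_max_ge_mem {L : List String} {s : String} (hs : s ∈ L) (a : Int) :
    pvRank s ≤ L.foldl (fun a s => max a (pvRank s)) a := by
  induction L generalizing a with
  | nil => cases hs
  | cons x xs ih =>
    rcases List.mem_cons.mp hs with h | h
    · subst h
      exact le_trans (le_max_right _ _) foldl_max_ge_init
    · exact ih h _

lemma foldl_max_cases (L : List String) : ∀ a : Int,
    L.foldl (fun a s => max a (pvRank s)) a = a ∨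
    ∃ s ∈ L, L.foldl (fun a s => max a (pvRank s)) a = pvRank s := by
  induction L with
  | nil => intro a; left; rfl
  | cons x xs ih =>
    intro a
    rcases ih (max a (pvRank x)) with h | ⟨s, hs, h⟩
    · simp only [List.foldl_cons, h]
      rcases max_cases a (pvRank x) with ⟨he, _⟩ | ⟨he, _⟩
      · left; exact he
      · right; exact ⟨x, List.mem_cons_self, he⟩
    · right; exact ⟨s, List.mem_cons_of_mem _ hs, h⟩

lemma rank_eq3 {s : String} (h : pvRank s = 3) : s = "Critical" := by
  unfold pvRank at h; split_ifs at h with h1 h2 h3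
  · exact eq_of_beq h1
  all_goals norm_num at h

lemma rank_eq2 {s : String} (h : pvRank s = 2) : s = "High" := by
  unfold pvRank at h; split_ifs at h with h1 h2 h3
  · norm_num at h
  · exact eq_of_beq h2
  all_goals norm_num at h

lemma rank_eq1 {s : String} (h : pvRank s = 1) : s = "Medium" := by
  unfold pvRank at h; split_ifs at h with h1 h2 h3
  · norm_num at h
  · norm_num at h
  · exact eq_of_beq h3
  · norm_num at h

lemma maxr_le3' (L : List String) : pvMaxr L ≤ 3 :=
  foldl_max_le (fun s _ => rank_le3 s) (by norm_num)

lemma maxr_eq3_iff (L : List String) : pvMaxr L = 3 ↔ "Critical" ∈ L := by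
  constructor
  · intro h
    rcases foldl_max_cases L 0 with hc | ⟨s, hs, hc⟩
    · rw [pvMaxr] at h; rw [hc] at h; norm_num at h
    · rw [pvMaxr] at h; rw [hc] at h
      exact (rank_eq3 h) ▸ hs
  · intro h
    have h1 := foldl_max_ge_mem h (0 : Int)
    have h2 : pvRank "Critical" = 3 := by decide
    rw [h2] at h1
    exact le_antisymm (maxr_le3' L) h1

lemma maxr_eq2_iff (L : List String) (hnc : "Critical" ∉ L) : pvMaxr L = 2 ↔ "High" ∈ L := by
  constructor
  · intro h
    rcases foldl_max_cases L 0 with hc | ⟨s, hs, hc⟩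
    · rw [pvMaxr] at h; rw [hc] at h; norm_num at h
    · rw [pvMaxr] at h; rw [hc] at h
      exact (rank_eq2 h) ▸ hs
  · intro h
    have h1 := foldl_max_ge_mem h (0 : Int)
    have h2 : pvRank "High" = 2 := by decide
    rw [h2] at h1
    have h3 : pvMaxr L ≤ 2 := by
      apply foldl_max_le _ (by norm_num)
      intro s hs
      by_cases hcs : s = "Critical"
      · exact absurd (hcs ▸ hs) hnc
      · unfold pvRank
        split_ifs with a1 a2 a3
        · exact absurd (eq_of_beq a1) hcs
        all_goals norm_num
    exact le_antisymm h3 h1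

lemma maxr_eq1_iff (L : List String) (hnc : "Critical" ∉ L) (hnh : "High" ∉ L) :
    pvMaxr L = 1 ↔ "Medium" ∈ L := by
  constructor
  · intro h
    rcases foldl_max_cases L 0 with hc | ⟨s, hs, hc⟩
    · rw [pvMaxr] at h; rw [hc] at h; norm_num at h
    · rw [pvMaxr] at h; rw [hc] at h
      exact (rank_eq1 h) ▸ hs
  · intro h
    have h1 := foldl_max_ge_mem h (0 : Int)
    have h2 : pvRank "Medium" = 1 := by decide
    rw [h2] at h1
    have h3 : pvMaxr L ≤ 1 := by
      apply foldl_max_le _ (by norm_num)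
      intro s hs
      by_cases hcs : s = "Critical"
      · exact absurd (hcs ▸ hs) hnc
      by_cases hhs : s = "High"
      · exact absurd (hhs ▸ hs) hnh
      unfold pvRank
      split_ifs with a1 a2 a3
      · exact absurd (eq_of_beq a1) hcs
      · exact absurd (eq_of_beq a2) hhs
      all_goals norm_num
    exact le_antisymm h3 h1

lemma contains_ofList (L : List String) (x : String) :
    PySem.Set.contains (PySem.Set.ofList L) x = L.contains x := by
  simp [PySem.Set.contains_iff, PySem.Set.mem_ofList, List.contains_iff_mem]

-- ===== VERDICT (by name: the statement is the Claim_ definition above) =====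
theorem determine_overall_status_spec : Claim_equal_determine_overall_status := by
  intro findings _
  unfold Spec_determine_overall_status determine_overall_status determine_overall_status_alt
  rw [foldB]
  set L := pvSevs findings with hL
  have hsevs : (findings.filter (fun f =>
      !(pvGet f "status" "Open" == "Resolved" || pvGet f "status" "Open" == "Accepted"))).map
      (fun f => pvGet f "severity" "Informational") = L := rfl
  simp only [hsevs]
  have hmax : L.foldl (fun a s => max a (pvRank s)) 0 = pvMaxr L := rfl
  simp only [hmax, contains_ofList]
  by_cases hC : "Critical" ∈ L
  · have : pvMaxr L = 3 := (maxr_eq3_iff L).mpr hC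
    simp [this, List.contains_iff_mem, hC]
  · by_cases hH : "High" ∈ L
    · have h2 : pvMaxr L = 2 := (maxr_eq2_iff L hC).mpr hH
      have h3 : pvMaxr L ≠ 3 := by
        intro h; exact hC ((maxr_eq3_iff L).mp h)
      simp [h2, List.contains_iff_mem, hC, hH]
    · by_cases hM : "Medium" ∈ L
      · have h1 : pvMaxr L = 1 := (maxr_eq1_iff L hC hH).mpr hM
        simp [h1, List.contains_iff_mem, hC, hH, hM]
      · have h3 : pvMaxr L ≠ 3 := fun h => hC ((maxr_eq3_iff L).mp h)
        have h2 : pvMaxr L ≠ 2 := fun h => hH ((maxr_eq2_iff L hC).mp h)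
        have h1 : pvMaxr L ≠ 1 := fun h => hM ((maxr_eq1_iff L hC hH).mp h)
        have h0 : pvMaxr L = 0 := by
          have : (0 : Int) ≤ pvMaxr L := foldl_max_ge_init; have := maxr_le3' L; omega
        by_cases he : L = []
        · have hef : (findings.filter (fun f =>
            !(pvGet f "status" "Open" == "Resolved" || pvGet f "status" "Open" == "Accepted"))) = [] :=
            List.map_eq_nil_iff.mp (hsevs.trans he)
          rw [hef]
          simp [he, pvMaxr]
        · have hef : (findings.filter (fun f =>
            !(pvGet f "status" "Open" == "Resolved" || pvGet f "status" "Open" == "Accepted"))) ≠ [] := by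
            intro hn
            exact he (by rw [← hsevs, hn]; rfl)
          have hie : (findings.filter (fun f =>
            !(pvGet f "status" "Open" == "Resolved" || pvGet f "status" "Open" == "Accepted"))).isEmpty = false := by
            simpa [List.isEmpty_iff] using hef
          have hlen : (0 : Int) < (L.length : Int) := by
            exact_mod_cast Nat.pos_of_ne_zero (fun h => he (List.eq_nil_of_length_eq_zero h))
          rw [hie]
          simp [h0, hC, hH, hM, hlen, he]
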